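-- pv_equiv track=rewrite | github.com/tvanh512/Composer-Classification | utils.py | neighbor_far
-- ===== SOURCE A (Python) =====
-- from copy import copy
--
-- def encode(x):
--     out = 0
--     for i in range(len(x)):
--         out = out + 2**(x[i])
--     return out
--
-- def neighbor_far(C):
--     gneg = []  #one element delete
--     gpov = []  #one element add
--     m = len(C)
--
--     if m >=2:
--         for i in range(m):
--             n = copy(C)
--             n.remove(n[i])
--             gneg.append(encode(n))
--
--     if m < 12:
--         for j in range(0,12):
--             if j not in (k for k in C):
--                 t = copy(C)
--                 t.append(j)
--                 gpov.append(encode(t))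
--     return {encode(C):(gneg+gpov)}
-- ===== SOURCE B (Python) =====
-- def neighbor_far(C):
--     base = sum(2 ** x for x in C)
--     m = len(C)
--     gneg = [base - 2 ** x for x in C] if m >= 2 else []
--     gpov = [base + 2 ** j for j in range(12) if j not in C] if m < 12 else []
--     return {base: gneg + gpov}
-- ===== Notes on version B (the rewrite author's own statement) =====
-- stated objective: faster
-- what changed: B computes the encoding base once and derives every neighbor encoding arithmetically (base - 2**x for deletions, base + 2**j for additions) instead of copying the list and re-running the summing encode loop for each neighbor.
import Mathlib
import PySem

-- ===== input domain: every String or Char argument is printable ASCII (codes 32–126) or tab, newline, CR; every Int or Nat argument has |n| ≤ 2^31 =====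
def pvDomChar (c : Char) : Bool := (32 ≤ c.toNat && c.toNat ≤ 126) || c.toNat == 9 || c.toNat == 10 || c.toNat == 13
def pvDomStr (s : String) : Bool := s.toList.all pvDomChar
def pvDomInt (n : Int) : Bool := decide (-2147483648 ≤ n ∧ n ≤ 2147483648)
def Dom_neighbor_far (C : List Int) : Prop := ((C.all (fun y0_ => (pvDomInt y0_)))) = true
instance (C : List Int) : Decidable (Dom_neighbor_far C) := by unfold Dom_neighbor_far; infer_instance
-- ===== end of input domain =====

-- B replaces A's per-neighbor list copy + re-encode loop by one base encoding plus
-- constant-time arithmetic per neighbor; equivalence is claimed on lists of non-negative ints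
-- (on a negative element Python's 2**x is a float, so A's result leaves the int type).

-- ===== PORT A =====
-- encode: out = 0; for i in range(len(x)): out = out + 2**x[i]
def encodeA (x : List Int) : Int :=
  (PySem.List.pyRange 0 x.length 1).foldl
    (fun out i => out + 2 ^ (PySem.List.pyGetD x i 0).toNat) 0

def neighbor_far (C : List Int) : List (Int × List Int) :=
  let m : Int := C.length
  let gneg : List Int :=
    if m ≥ 2 then
      (PySem.List.pyRange 0 m 1).foldl
        (fun acc i =>
          -- n = copy(C); n.remove(n[i])  (remove-by-value, first occurrence; n[i] is
          -- always in range, so the in-range read and the always-found remove are exact)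
          acc ++ [encodeA ((PySem.List.remove? C (PySem.List.pyGetD C i 0)).getD C)]) []
    else []
  let gpov : List Int :=
    if m < 12 then
      (PySem.List.pyRange 0 12 1).foldl
        (fun acc j =>
          if j ∈ C then acc
          else acc ++ [encodeA (C ++ [j])]) []
    else []
  [(encodeA C, gneg ++ gpov)]

-- ===== PORT B =====
-- base = sum(2**x for x in C)
def encodeB (C : List Int) : Int := (C.map (fun x => (2:Int) ^ x.toNat)).sum

def neighbor_far_alt (C : List Int) : List (Int × List Int) :=
  let base := encodeB C
  let m : Int := C.length
  let gneg : List Int := if m ≥ 2 then C.map (fun x => base - 2 ^ x.toNat) else []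
  let gpov : List Int :=
    if m < 12 then
      ((PySem.List.pyRange 0 12 1).filter (fun j => decide (j ∉ C))).map
        (fun j => base + 2 ^ j.toNat)
    else []
  [(base, gneg ++ gpov)]

-- ===== PRECONDITION & SPEC =====
-- Pre_ excludes lists with a negative element: there Python's 2**x is a float, so A's
-- returned dict holds floats rather than ints (outside the declared return type).
def Pre_neighbor_far (C : List Int) : Prop := ∀ x ∈ C, 0 ≤ x
instance (C : List Int) : Decidable (Pre_neighbor_far C) := by unfold Pre_neighbor_far; infer_instance
def pvWitness_neighbor_far : List Int := [1, 3, 3]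

def Spec_neighbor_far (C : List Int) (out : List (Int × List Int)) : Prop := out = neighbor_far_alt C
instance (C : List Int) (out : List (Int × List Int)) : Decidable (Spec_neighbor_far C out) := by unfold Spec_neighbor_far; infer_instance

-- ===== CLAIM (what is proved, stated in full; the proofs are below) =====
def Claim_equal_neighbor_far : Prop := ∀ (C : List Int), Dom_neighbor_far C → Pre_neighbor_far C → Spec_neighbor_far C (neighbor_far C)

-- ===== LEMMAS AND PROOFS =====

theorem encodeA_eq_encodeB (x : List Int) : encodeA x = encodeB x := by
  unfold encodeA encodeB
  rw [PySem.List.foldl_pyRange_zero_pyGetD' x 0 (fun out v => out + 2 ^ v.toNat) 0]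
  induction x using List.reverseRecOn with
  | nil => simp
  | append_singleton xs v ih => simp [List.foldl_append, ih]

-- removing one occurrence of value v from xs subtracts 2^v from the encoding
theorem encodeB_erase (xs : List Int) (v : Int) (hv : v ∈ xs) :
    encodeB (xs.erase v) = encodeB xs - 2 ^ v.toNat := by
  induction xs with
  | nil => cases hv
  | cons x xs ih =>
    by_cases hx : x = v
    · subst hx; simp [List.erase_cons_head, encodeB]
    · rw [List.erase_cons_tail (by simp [hx])]
      rcases List.mem_cons.mp hv with h | h
      · exact absurd h.symm hx
      · simp only [encodeB, List.map_cons, List.sum_cons] at *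
        rw [ih h]; ring

theorem encodeB_append_singleton (xs : List Int) (j : Int) :
    encodeB (xs ++ [j]) = encodeB xs + 2 ^ j.toNat := by
  simp [encodeB]

theorem gpov_foldl (C : List Int) (js : List Int) (acc : List Int) :
    js.foldl (fun acc j => if j ∈ C then acc else acc ++ [encodeA (C ++ [j])]) acc
      = acc ++ (js.filter (fun j => decide (j ∉ C))).map (fun j => encodeB C + 2 ^ j.toNat) := by
  induction js generalizing acc with
  | nil => simp
  | cons j js ih =>
    simp only [List.foldl_cons, List.filter_cons]
    by_cases hj : j ∈ C
    · simp [hj, ih]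
    · simp only [hj, if_false, ih]
      simp [encodeA_eq_encodeB, encodeB_append_singleton]

theorem gneg_foldl (C : List Int) :
    ∀ (k : Nat) (acc : List Int), k ≤ C.length →
    (PySem.List.pyRange (C.length - k : Nat) C.length 1).foldl
        (fun acc i => acc ++ [encodeA ((PySem.List.remove? C (PySem.List.pyGetD C i 0)).getD C)]) acc
      = acc ++ ((C.drop (C.length - k)).map (fun x => encodeB C - 2 ^ x.toNat)) := by
  intro k
  induction k with
  | zero =>
    intro acc _
    simp [PySem.List.pyRange_one_eq_nil]
  | succ k ih =>
    intro acc hk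
    have hlt : (C.length - (k+1) : Nat) < C.length := by omega
    have hlt' : ((C.length - (k+1) : Nat) : Int) < (C.length : Int) := by exact_mod_cast hlt
    rw [PySem.List.pyRange_one_cons hlt']
    have hstep : ((C.length - (k+1) : Nat) : Int) + 1 = ((C.length - k : Nat) : Int) := by
      omega
    rw [List.foldl_cons, hstep, ih _ (by omega)]
    have hget : PySem.List.pyGetD C ((C.length - (k+1) : Nat) : Int) 0 = C[C.length - (k+1)]'hlt := by
      rw [PySem.List.pyGetD_natCast]
      simp [List.getD, hlt]
    have hmem : C[C.length - (k+1)]'hlt ∈ C := List.getElem_mem hlt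
    have hrem : (PySem.List.remove? C (C[C.length - (k+1)]'hlt)).getD C
        = C.erase (C[C.length - (k+1)]'hlt) := by
      rw [PySem.List.remove?_eq_some_erase C _ hmem]; rfl
    have hdrop : C.drop (C.length - (k+1)) = C[C.length - (k+1)]'hlt :: C.drop (C.length - k) := by
      have he : C.length - (k+1) + 1 = C.length - k := by omega
      rw [List.drop_eq_getElem_cons hlt, he]
    rw [hget, hrem, hdrop]
    simp [encodeA_eq_encodeB, encodeB_erase C _ hmem]

-- ===== VERDICT (by name: the statement is the Claim_ definition above) =====
theorem neighbor_far_spec : Claim_equal_neighbor_far := by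
  intro C _ _
  have hg := gneg_foldl C C.length [] (le_refl _)
  simp only [Nat.sub_self, Nat.cast_zero, List.drop_zero, List.nil_append] at hg
  have hp := gpov_foldl C (PySem.List.pyRange 0 12 1) []
  simp only [List.nil_append] at hp
  unfold Spec_neighbor_far
  simp only [neighbor_far, neighbor_far_alt]
  rw [encodeA_eq_encodeB, hg, hp]
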